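-- pv_equiv track=rewrite | github.com/ngruver/NOS | seq_models/sample.py | make_tags
-- ===== SOURCE A (Python) =====
-- def make_tags(
--     numbering_schemes,
--     cdr_combos
-- ):
--     tags = []
--     for num_scheme in numbering_schemes:
--         tags += [
--             num_scheme + ":" + "/".join(cdr_ids) for cdr_ids in cdr_combos
--         ]
--     return tags
-- ===== SOURCE B (Python) =====
-- def make_tags(
--     numbering_schemes,
--     cdr_combos
-- ):
--     joined = ["/".join(cdr_ids) for cdr_ids in cdr_combos]
--     m = len(joined)
--     return [
--         numbering_schemes[k // m] + ":" + joined[k % m]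
--         for k in range(len(numbering_schemes) * m)
--     ]
-- ===== Notes on version B (the rewrite author's own statement) =====
-- stated objective: alternative
-- what changed: Replaces A's nested accumulator loops (re-joining every combo for each scheme) with a flat single comprehension over range(n*m) that addresses a precomputed joined table by divmod index arithmetic.
import Mathlib
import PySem

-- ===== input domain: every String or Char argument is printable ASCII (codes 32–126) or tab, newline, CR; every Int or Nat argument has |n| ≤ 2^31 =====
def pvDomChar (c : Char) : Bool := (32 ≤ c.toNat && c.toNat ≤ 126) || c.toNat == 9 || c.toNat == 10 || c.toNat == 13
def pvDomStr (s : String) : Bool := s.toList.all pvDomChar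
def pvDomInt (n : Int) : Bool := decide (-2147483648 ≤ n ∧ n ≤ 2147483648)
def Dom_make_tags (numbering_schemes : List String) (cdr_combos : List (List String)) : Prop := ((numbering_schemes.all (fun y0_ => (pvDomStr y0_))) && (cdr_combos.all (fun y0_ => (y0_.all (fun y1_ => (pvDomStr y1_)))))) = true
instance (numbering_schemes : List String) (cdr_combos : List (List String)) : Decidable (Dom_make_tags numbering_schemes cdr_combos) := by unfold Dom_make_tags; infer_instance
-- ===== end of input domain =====

-- B builds the tags in one flat pass over range(n*m), addressing a precomputed joined table by divmod index arithmetic (alternative decomposition; same order and values).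
-- ===== PORT A =====
-- exact Python '+' on strings, kernel-reducible (Lean's String.append is opaque)
def pyCat (a b : String) : String := String.ofList (a.toList ++ b.toList)

def make_tags (numbering_schemes : List String) (cdr_combos : List (List String)) : List String :=
  numbering_schemes.foldl
    (fun tags num_scheme =>
      tags ++ cdr_combos.map (fun cdr_ids => pyCat (pyCat num_scheme ":") (PySem.Str.join "/" cdr_ids)))
    []

-- ===== PORT B =====
def make_tags_alt (numbering_schemes : List String) (cdr_combos : List (List String)) : List String :=
  let joined := cdr_combos.map (fun cdr_ids => PySem.Str.join "/" cdr_ids)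
  let m : Int := joined.length
  (PySem.List.pyRange 0 ((numbering_schemes.length : Int) * m) 1).map (fun k =>
    pyCat (pyCat (PySem.List.pyGetD numbering_schemes (PySem.Int.floordiv k m) "") ":")
      (PySem.List.pyGetD joined (PySem.Int.mod k m) ""))

-- ===== PRECONDITION & SPEC =====
def Spec_make_tags (numbering_schemes : List String) (cdr_combos : List (List String)) (out : List String) : Prop := out = make_tags_alt numbering_schemes cdr_combos
instance (numbering_schemes : List String) (cdr_combos : List (List String)) (out : List String) : Decidable (Spec_make_tags numbering_schemes cdr_combos out) := by unfold Spec_make_tags; infer_instance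

-- ===== CLAIM (what is proved, stated in full; the proofs are below) =====
def Claim_equal_make_tags : Prop := ∀ (numbering_schemes : List String) (cdr_combos : List (List String)), Dom_make_tags numbering_schemes cdr_combos → Spec_make_tags numbering_schemes cdr_combos (make_tags numbering_schemes cdr_combos)

-- ===== LEMMAS AND PROOFS =====

-- map over indices equals map over elements
theorem map_range_getD {α β : Type} [Inhabited α] (h : α → β) (ys : List α) (d : α) :
    (List.range ys.length).map (fun k => h (ys.getD k d)) = ys.map h := by
  apply List.ext_getElem
  · simp
  · intro i h1 h2
    simp [List.getD_eq_getElem?_getD, List.getElem?_eq_getElem (by simpa using h1)]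

-- key: the flat index-arithmetic construction equals the nested flatMap
theorem flatMap_eq_range_divmod (F : String → String → String) (ys : List String) :
    ∀ ns : List String,
      ns.flatMap (fun s => ys.map (F s)) =
        (List.range (ns.length * ys.length)).map
          (fun k => F (ns.getD (k / ys.length) "") (ys.getD (k % ys.length) "")) := by
  intro ns
  rcases Nat.eq_zero_or_pos ys.length with hm | hm
  · rw [List.length_eq_zero_iff] at hm
    subst hm; simp
  · induction ns with
    | nil => simp
    | cons s rest ih =>
      have hlen : (s :: rest).length * ys.length = ys.length + rest.length * ys.length := by
        simp [Nat.succ_mul, Nat.add_comm]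
      rw [List.flatMap_cons, hlen, List.range_add, List.map_append, List.map_map]
      congr 1
      · rw [← map_range_getD (F s) ys ""]
        apply List.map_congr_left
        intro k hk
        rw [List.mem_range] at hk
        rw [Nat.div_eq_of_lt hk, Nat.mod_eq_of_lt hk]
        simp
      · rw [ih]
        apply List.map_congr_left
        intro k _
        simp only [Function.comp_apply]
        rw [Nat.add_comm ys.length k, Nat.add_div_right _ hm, Nat.add_mod_right]
        simp

-- ===== VERDICT (by name: the statement is the Claim_ definition above) =====
theorem make_tags_spec : Claim_equal_make_tags := by
  intro ns cc _
  unfold Spec_make_tags make_tags make_tags_alt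
  rw [PySem.List.foldl_append_eq_flatMap]
  simp only [PySem.List.pyRange_one, List.map_map, List.length_map]
  have hcast : ((ns.length : Int) * (cc.length : Int) - 0) = ((ns.length * cc.length : Nat) : Int) := by
    push_cast; ring
  rw [hcast, Int.toNat_natCast]
  have key := flatMap_eq_range_divmod
    (fun s j => pyCat (pyCat s ":") j) (cc.map (fun c => PySem.Str.join "/" c)) ns
  simp only [List.map_map, Function.comp_def, List.length_map] at key
  rw [key, List.nil_append]
  apply List.map_congr_left
  intro k _
  simp only [Function.comp_apply, zero_add]
  rw [PySem.Int.floordiv_natCast, PySem.Int.mod_natCast,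
      PySem.List.pyGetD_natCast, PySem.List.pyGetD_natCast]
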